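-- pv_equiv track=rewrite | github.com/BlakeMcCulligh/Structural_Solver | StructuralAnalysis/frame3DSolver/helperFunctions.py | getNumVarables
-- ===== SOURCE A (Python) =====
-- def getNumVarables(memberGroupType: list):
--     """
--     Gets the number of variables to be in the optimization problem.
--
--     :param memberGroupType: list. List of cross-section types for each member group to be assigned.
--     :return:
--         numVariables: int, number of variables in the optimization.
--     """
--
--     numVarables = 0
--     for t in memberGroupType:
--         if t == "Angle":
--             numVarables += 3
--         elif t == "RectHSS":
--             numVarables += 3
--         elif t == "SquareHSS":
--             numVarables += 2
--         elif t == "TubeHSS":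
--             numVarables += 2
--         else:
--             raise Exception('member groupe type is not a valid cross section type. Chose one of the following: Angle, RectHSS, SquareHSS, TubeHSS')
--     return numVarables
-- ===== SOURCE B (Python) =====
-- _VALID = ("Angle", "RectHSS", "SquareHSS", "TubeHSS")
--
-- def getNumVarables(memberGroupType: list):
--     """Closed-form reimplementation: every valid cross-section type contributes
--     a base of 2 variables, and Angle/RectHSS contribute 1 extra each, so the
--     total is 2*len + count('Angle') + count('RectHSS')."""
--     if not all(t in _VALID for t in memberGroupType):
--         raise Exception('member groupe type is not a valid cross section type. Chose one of the following: Angle, RectHSS, SquareHSS, TubeHSS')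
--     return (2 * len(memberGroupType)
--             + memberGroupType.count("Angle")
--             + memberGroupType.count("RectHSS"))
-- ===== Notes on version B (the rewrite author's own statement) =====
-- stated objective: simpler
-- what changed: Replaces the per-element if/elif accumulation loop by a validation pass plus a closed-form arithmetic identity: each valid type weighs at least 2, with 1 extra for Angle/RectHSS, so the answer is 2*len + count('Angle') + count('RectHSS').
import Mathlib
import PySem

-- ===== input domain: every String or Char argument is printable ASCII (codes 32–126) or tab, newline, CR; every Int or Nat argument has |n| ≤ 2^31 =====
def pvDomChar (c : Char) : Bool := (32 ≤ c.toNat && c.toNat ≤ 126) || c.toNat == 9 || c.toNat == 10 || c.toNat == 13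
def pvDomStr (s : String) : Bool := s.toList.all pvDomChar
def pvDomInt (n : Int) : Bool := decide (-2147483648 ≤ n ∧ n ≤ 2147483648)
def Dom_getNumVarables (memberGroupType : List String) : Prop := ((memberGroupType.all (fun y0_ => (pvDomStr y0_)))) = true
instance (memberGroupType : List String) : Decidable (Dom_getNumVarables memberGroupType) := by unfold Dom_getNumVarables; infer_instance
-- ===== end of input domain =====

-- B replaces A's per-element if/elif accumulation loop by a validation pass plus
-- the closed form 2*len + count "Angle" + count "RectHSS" (simpler decomposition).

-- ===== PORT A =====
-- A's loop: add the weight of each element; the final 'else' branch is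
-- 'raise Exception(...)' in Python — those inputs are excluded by Pre_ below.
def getNumVarables (memberGroupType : List String) : Int :=
  memberGroupType.foldl (fun numVarables t =>
    if t = "Angle" then numVarables + 3
    else if t = "RectHSS" then numVarables + 3
    else if t = "SquareHSS" then numVarables + 2
    else if t = "TubeHSS" then numVarables + 2
    else numVarables) 0  -- Python raises here; outside Pre_

-- ===== PORT B =====
def pvValid : List String := ["Angle", "RectHSS", "SquareHSS", "TubeHSS"]

def getNumVarables_alt (memberGroupType : List String) : Int :=
  if memberGroupType.all (fun t => pvValid.contains t) then
    2 * (memberGroupType.length : Int)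
      + (PySem.List.count memberGroupType "Angle")
      + (PySem.List.count memberGroupType "RectHSS")
  else 0  -- Python raises here; outside Pre_

-- ===== PRECONDITION & SPEC =====
-- Pre_ excludes exactly the inputs on which A raises Exception: an element that
-- is not one of the four valid cross-section type names.
def Pre_getNumVarables (memberGroupType : List String) : Prop :=
  ∀ t ∈ memberGroupType,
    t = "Angle" ∨ t = "RectHSS" ∨ t = "SquareHSS" ∨ t = "TubeHSS"
instance (memberGroupType : List String) : Decidable (Pre_getNumVarables memberGroupType) := by
  unfold Pre_getNumVarables; infer_instance

def pvWitness_getNumVarables : List String :=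
  ["Angle", "TubeHSS", "Angle", "SquareHSS", "RectHSS"]

def Spec_getNumVarables (memberGroupType : List String) (out : Int) : Prop :=
  out = getNumVarables_alt memberGroupType
instance (memberGroupType : List String) (out : Int) : Decidable (Spec_getNumVarables memberGroupType out) := by
  unfold Spec_getNumVarables; infer_instance

-- ===== CLAIM (what is proved, stated in full; the proofs are below) =====
def Claim_equal_getNumVarables : Prop :=
  ∀ (memberGroupType : List String), Dom_getNumVarables memberGroupType →
    Pre_getNumVarables memberGroupType →
    Spec_getNumVarables memberGroupType (getNumVarables memberGroupType)

-- ===== LEMMAS AND PROOFS =====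

lemma a_acc (xs : List String) :
    ∀ acc : Int, Pre_getNumVarables xs →
      xs.foldl (fun numVarables t =>
        if t = "Angle" then numVarables + 3
        else if t = "RectHSS" then numVarables + 3
        else if t = "SquareHSS" then numVarables + 2
        else if t = "TubeHSS" then numVarables + 2
        else numVarables) acc
      = acc + 2 * (xs.length : Int)
          + (PySem.List.count xs "Angle")
          + (PySem.List.count xs "RectHSS") := by
  induction xs with
  | nil => intro acc _; simp [PySem.List.count]
  | cons t xs ih =>
    intro acc hpre
    have htl : Pre_getNumVarables xs := fun u hu => hpre u (List.mem_cons_of_mem _ hu)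
    have ht := hpre t (List.mem_cons_self ..)
    rcases ht with h | h | h | h <;> subst h <;>
      simp only [List.foldl_cons, reduceIte] <;>
      rw [ih _ htl] <;>
      simp [PySem.List.count] <;> ring

-- ===== VERDICT (by name: the statement is the Claim_ definition above) =====
theorem getNumVarables_spec : Claim_equal_getNumVarables := by
  intro xs _ hpre
  unfold Spec_getNumVarables getNumVarables getNumVarables_alt
  have hall : xs.all (fun t => pvValid.contains t) = true := by
    rw [List.all_eq_true]
    intro t ht
    rcases hpre t ht with h | h | h | h <;> subst h <;> decide
  rw [if_pos hall, a_acc xs 0 hpre]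
  ring
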